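-- pv_equiv track=rewrite | github.com/harsh903/xphora-pulse.1 | backend/app/agents/prediction_agent.py | generate_area_recommendations
-- ===== SOURCE A (Python) =====
-- def generate_area_recommendations(area, is_rainy, alerts) -> str:
--     """Generate area-specific recommendations based on alerts."""
--     recommendations = []
--
--     # Add area-specific recommendations
--     recommendations.append(f"- Plan travel routes through {area} to avoid known congestion points, especially during peak hours.")
--
--     # Check for high severity alerts
--     high_severity_issues = [alert for alert in alerts if alert.get('severity') == 'high']
--     if high_severity_issues:
--         high_locations = ", ".join([issue.get('location') for issue in high_severity_issues[:2]])
--         recommendations.append(f"- Avoid {high_locations} if possible, as these areas have high-severity issues.")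
--
--     # Add rain-specific recommendations
--     if is_rainy:
--         recommendations.append(f"- Check for waterlogging updates before traveling through {area} during rainfall.")
--         recommendations.append(f"- Keep a 10-15 minute buffer in travel plans for {area} due to potential rain-related delays.")
--
--     # Add issue-specific recommendations
--     traffic_issues = [alert for alert in alerts if alert.get('issue') == 'traffic congestion']
--     if traffic_issues:
--         recommendations.append(f"- Consider alternative transport options when traveling through {area} during peak hours.")
--
--     infra_issues = [alert for alert in alerts if alert.get('issue') == 'infrastructure']
--     if infra_issues:
--         recommendations.append(f"- Drive cautiously on inner roads in {area} due to reported infrastructure issues.")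
--
--     # Add general recommendations
--     recommendations.append(f"- Stay updated with real-time traffic apps when traveling through {area}.")
--     recommendations.append(f"- Report any new civic issues in {area} to the BBMP helpline (080-22660000).")
--
--     return "\n".join(recommendations)
-- ===== SOURCE B (Python) =====
-- def generate_area_recommendations(area, is_rainy, alerts) -> str:
--     """Generate area-specific recommendations based on alerts."""
--     # One pass over alerts collects everything the text needs.
--     high_locations = []
--     has_traffic = False
--     has_infra = False
--     for alert in alerts:
--         if alert.get('severity') == 'high':
--             high_locations.append(alert.get('location'))
--         if alert.get('issue') == 'traffic congestion':
--             has_traffic = True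
--         if alert.get('issue') == 'infrastructure':
--             has_infra = True
--
--     lines = [f"- Plan travel routes through {area} to avoid known congestion points, especially during peak hours."]
--     if high_locations:
--         lines.append(f"- Avoid {', '.join(high_locations[:2])} if possible, as these areas have high-severity issues.")
--     if is_rainy:
--         lines.append(f"- Check for waterlogging updates before traveling through {area} during rainfall.")
--         lines.append(f"- Keep a 10-15 minute buffer in travel plans for {area} due to potential rain-related delays.")
--     if has_traffic:
--         lines.append(f"- Consider alternative transport options when traveling through {area} during peak hours.")
--     if has_infra:
--         lines.append(f"- Drive cautiously on inner roads in {area} due to reported infrastructure issues.")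
--     lines.append(f"- Stay updated with real-time traffic apps when traveling through {area}.")
--     lines.append(f"- Report any new civic issues in {area} to the BBMP helpline (080-22660000).")
--     return "\n".join(lines)
-- ===== Notes on version B (the rewrite author's own statement) =====
-- stated objective: alternative
-- what changed: Replaces A's three separate filtering passes over alerts with a single accumulator-carrying pass (high-location list plus two booleans), then assembles the same lines in the same order.
import Mathlib
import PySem

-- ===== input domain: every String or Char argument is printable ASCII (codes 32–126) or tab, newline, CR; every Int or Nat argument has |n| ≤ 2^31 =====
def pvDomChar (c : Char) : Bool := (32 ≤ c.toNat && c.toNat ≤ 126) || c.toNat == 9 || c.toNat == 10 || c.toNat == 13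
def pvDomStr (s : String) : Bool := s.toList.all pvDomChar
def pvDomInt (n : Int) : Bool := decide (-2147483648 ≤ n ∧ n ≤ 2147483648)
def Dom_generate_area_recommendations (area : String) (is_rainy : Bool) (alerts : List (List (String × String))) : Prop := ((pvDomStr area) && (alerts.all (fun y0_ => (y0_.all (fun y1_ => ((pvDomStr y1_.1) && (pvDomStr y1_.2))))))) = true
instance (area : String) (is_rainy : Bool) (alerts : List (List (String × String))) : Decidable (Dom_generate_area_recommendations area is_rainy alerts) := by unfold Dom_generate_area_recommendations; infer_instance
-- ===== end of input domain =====

-- B replaces A's three filtering passes over `alerts` with one accumulator-carrying pass; same lines, same order.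

-- ===== PORT A =====
-- Under Pre_ every accessed 'location' key is present, so `.getD ""` never fires
-- (Python raises TypeError exactly where it would; those inputs are outside Pre_).
def generate_area_recommendations (area : String) (is_rainy : Bool) (alerts : List (List (String × String))) : String :=
  let recommendations : List String :=
    ["- Plan travel routes through " ++ area ++ " to avoid known congestion points, especially during peak hours."]
  let high_severity_issues := alerts.filter (fun alert => (PySem.Dict.mk alert).get? "severity" == some "high")
  let recommendations :=
    if high_severity_issues.isEmpty then recommendations else
      let high_locations := PySem.Str.join ", "
        ((high_severity_issues.take 2).map (fun issue => ((PySem.Dict.mk issue).get? "location").getD ""))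
      recommendations ++ ["- Avoid " ++ high_locations ++ " if possible, as these areas have high-severity issues."]
  let recommendations :=
    if is_rainy then
      recommendations ++
        ["- Check for waterlogging updates before traveling through " ++ area ++ " during rainfall.",
         "- Keep a 10-15 minute buffer in travel plans for " ++ area ++ " due to potential rain-related delays."]
    else recommendations
  let traffic_issues := alerts.filter (fun alert => (PySem.Dict.mk alert).get? "issue" == some "traffic congestion")
  let recommendations :=
    if traffic_issues.isEmpty then recommendations else
      recommendations ++ ["- Consider alternative transport options when traveling through " ++ area ++ " during peak hours."]
  let infra_issues := alerts.filter (fun alert => (PySem.Dict.mk alert).get? "issue" == some "infrastructure")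
  let recommendations :=
    if infra_issues.isEmpty then recommendations else
      recommendations ++ ["- Drive cautiously on inner roads in " ++ area ++ " due to reported infrastructure issues."]
  let recommendations := recommendations ++
    ["- Stay updated with real-time traffic apps when traveling through " ++ area ++ ".",
     "- Report any new civic issues in " ++ area ++ " to the BBMP helpline (080-22660000)."]
  PySem.Str.join "\n" recommendations

-- ===== PORT B =====
-- the single-pass accumulator: (high locations so far, has_traffic, has_infra)
def garStep (st : List String × Bool × Bool) (alert : List (String × String)) : List String × Bool × Bool :=
  let st := if (PySem.Dict.mk alert).get? "severity" == some "high"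
            then (st.1 ++ [((PySem.Dict.mk alert).get? "location").getD ""], st.2.1, st.2.2) else st
  let st := if (PySem.Dict.mk alert).get? "issue" == some "traffic congestion"
            then (st.1, true, st.2.2) else st
  if (PySem.Dict.mk alert).get? "issue" == some "infrastructure" then (st.1, st.2.1, true) else st

def generate_area_recommendations_alt (area : String) (is_rainy : Bool) (alerts : List (List (String × String))) : String :=
  let st := alerts.foldl garStep ([], false, false)
  let high_locations := st.1
  let has_traffic := st.2.1
  let has_infra := st.2.2
  let lines : List String :=
    ["- Plan travel routes through " ++ area ++ " to avoid known congestion points, especially during peak hours."]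
  let lines :=
    if high_locations.isEmpty then lines else
      lines ++ ["- Avoid " ++ PySem.Str.join ", " (high_locations.take 2) ++ " if possible, as these areas have high-severity issues."]
  let lines :=
    if is_rainy then
      lines ++
        ["- Check for waterlogging updates before traveling through " ++ area ++ " during rainfall.",
         "- Keep a 10-15 minute buffer in travel plans for " ++ area ++ " due to potential rain-related delays."]
    else lines
  let lines := if has_traffic then
      lines ++ ["- Consider alternative transport options when traveling through " ++ area ++ " during peak hours."]
    else lines
  let lines := if has_infra then
      lines ++ ["- Drive cautiously on inner roads in " ++ area ++ " due to reported infrastructure issues."]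
    else lines
  let lines := lines ++
    ["- Stay updated with real-time traffic apps when traveling through " ++ area ++ ".",
     "- Report any new civic issues in " ++ area ++ " to the BBMP helpline (080-22660000)."]
  PySem.Str.join "\n" lines

-- ===== PRECONDITION & SPEC =====
-- Pre_ excludes exactly the inputs where Python A raises TypeError: a missing 'location'
-- key on one of the first two high-severity alerts (", ".join(None) in A; B raises there too).
def Pre_generate_area_recommendations (area : String) (is_rainy : Bool) (alerts : List (List (String × String))) : Prop :=
  ∀ al ∈ (alerts.filter (fun alert => (PySem.Dict.mk alert).get? "severity" == some "high")).take 2,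
    ((PySem.Dict.mk al).get? "location").isSome
instance (area : String) (is_rainy : Bool) (alerts : List (List (String × String))) : Decidable (Pre_generate_area_recommendations area is_rainy alerts) := by unfold Pre_generate_area_recommendations; infer_instance

def pvWitness_generate_area_recommendations : String × Bool × (List (List (String × String))) :=
  ("Indiranagar", true, [[("severity", "high"), ("location", "MG Road")], [("issue", "traffic congestion")]])

def Spec_generate_area_recommendations (area : String) (is_rainy : Bool) (alerts : List (List (String × String))) (out : String) : Prop := out = generate_area_recommendations_alt area is_rainy alerts
instance (area : String) (is_rainy : Bool) (alerts : List (List (String × String))) (out : String) : Decidable (Spec_generate_area_recommendations area is_rainy alerts out) := by unfold Spec_generate_area_recommendations; infer_instance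

-- ===== CLAIM (what is proved, stated in full; the proofs are below) =====
def Claim_equal_generate_area_recommendations : Prop := ∀ (area : String) (is_rainy : Bool) (alerts : List (List (String × String))), Dom_generate_area_recommendations area is_rainy alerts → Pre_generate_area_recommendations area is_rainy alerts → Spec_generate_area_recommendations area is_rainy alerts (generate_area_recommendations area is_rainy alerts)

-- ===== LEMMAS AND PROOFS =====

-- the fold computes: appended locations of high alerts, OR of the traffic flags, OR of the infra flags
theorem garStep_fold (alerts : List (List (String × String))) (locs : List String) (t i : Bool) :
    alerts.foldl garStep (locs, t, i) =
      (locs ++ (alerts.filter (fun alert => (PySem.Dict.mk alert).get? "severity" == some "high")).map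
          (fun al => ((PySem.Dict.mk al).get? "location").getD ""),
       t || alerts.any (fun alert => (PySem.Dict.mk alert).get? "issue" == some "traffic congestion"),
       i || alerts.any (fun alert => (PySem.Dict.mk alert).get? "issue" == some "infrastructure")) := by
  induction alerts generalizing locs t i with
  | nil => simp
  | cons a rest ih =>
    simp only [List.foldl_cons, List.filter_cons, List.any_cons]
    rw [garStep]
    by_cases hs : (PySem.Dict.mk a).get? "severity" == some "high" <;>
      by_cases ht : (PySem.Dict.mk a).get? "issue" == some "traffic congestion" <;>
        by_cases hi : (PySem.Dict.mk a).get? "issue" == some "infrastructure" <;>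
          simp [hs, ht, hi, ih]

theorem filter_isEmpty_eq_not_any {α : Type} (p : α → Bool) (xs : List α) :
    (xs.filter p).isEmpty = !xs.any p := by
  induction xs with
  | nil => rfl
  | cons a rest ih => by_cases h : p a <;> simp [List.filter_cons, h, ih]

-- ===== VERDICT (by name: the statement is the Claim_ definition above) =====
theorem generate_area_recommendations_spec : Claim_equal_generate_area_recommendations := by
  intro area is_rainy alerts _ _
  show _ = _
  rw [generate_area_recommendations, generate_area_recommendations_alt]
  simp only [garStep_fold, List.nil_append, Bool.false_or, List.map_take,
    List.isEmpty_map, filter_isEmpty_eq_not_any]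
  cases hs : alerts.any (fun alert => (PySem.Dict.mk alert).get? "severity" == some "high") <;>
    cases ht : alerts.any (fun alert => (PySem.Dict.mk alert).get? "issue" == some "traffic congestion") <;>
      cases hi : alerts.any (fun alert => (PySem.Dict.mk alert).get? "issue" == some "infrastructure") <;>
        simp
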